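-- pv_equiv track=rewrite | github.com/dylandrobi/Poker-Python | Robichaud_CS_120_Proj2/poker_hand.py | __obtain_pair_value
-- ===== SOURCE A (Python) =====
-- def __obtain_pair_value(ranks):
--     """
--     given a list of ranks, retrieve the rank of the pair, pop both occurrences of the rank out of the list,
--     then return the rank value
--
--     :param ranks: a list containing the rank of each card in hand
--     :return boolean: True if it contains a pair
--     """
--     len_ranks = len(ranks)
--     for i in range(0, len_ranks - 1):
--         for j in range(i + 1, len_ranks):
--             if ranks[i] == ranks[j]:
--                 pair_value = ranks[i]
--                 ranks.remove(pair_value)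
--                 ranks.remove(pair_value)
--                 return pair_value
-- ===== SOURCE B (Python) =====
-- def __obtain_pair_value(ranks):
--     counts = {}
--     for r in ranks:
--         counts[r] = counts.get(r, 0) + 1
--     for r in ranks:
--         if counts[r] >= 2:
--             ranks.remove(r)
--             ranks.remove(r)
--             return r
-- ===== Notes on version B (the rewrite author's own statement) =====
-- stated objective: alternative
-- what changed: Replaces the O(n^2) nested index scan with a one-pass frequency dictionary followed by a single pass that returns the first rank whose count is at least 2 (performing the same two removals).
import Mathlib
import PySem

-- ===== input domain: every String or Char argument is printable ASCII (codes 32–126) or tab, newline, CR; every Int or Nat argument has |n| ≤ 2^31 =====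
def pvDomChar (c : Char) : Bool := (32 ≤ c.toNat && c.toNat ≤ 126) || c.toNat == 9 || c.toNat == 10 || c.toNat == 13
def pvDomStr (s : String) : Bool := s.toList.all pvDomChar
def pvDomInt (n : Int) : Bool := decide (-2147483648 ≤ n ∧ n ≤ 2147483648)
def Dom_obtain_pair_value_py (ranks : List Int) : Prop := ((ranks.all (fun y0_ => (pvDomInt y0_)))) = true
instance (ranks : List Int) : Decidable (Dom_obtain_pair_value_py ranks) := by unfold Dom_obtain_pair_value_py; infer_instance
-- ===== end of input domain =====

-- B replaces A's O(n^2) nested index scan by a frequency dictionary plus one pass taking the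
-- first rank with count >= 2. Both Pythons mutate `ranks` identically (two remove calls);
-- the equivalence proved here is about the RETURN value.

-- ===== PORT A =====
-- inner loop: for j in range(i+1, len_ranks): if ranks[i] == ranks[j]: return ranks[i]
def pvAInner (ranks : List Int) (i j : Nat) : Option Int :=
  if j < ranks.length then
    if ranks.getD i 0 = ranks.getD j 0 then some (ranks.getD i 0)
    else pvAInner ranks i (j + 1)
  else none
termination_by ranks.length - j

-- outer loop: for i in range(0, len_ranks - 1)
def pvAOuter (ranks : List Int) (i : Nat) : Option Int :=
  if i + 1 < ranks.length then
    match pvAInner ranks i (i + 1) with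
    | some v => some v
    | none => pvAOuter ranks (i + 1)
  else none
termination_by ranks.length - i

def obtain_pair_value_py (ranks : List Int) : Option Int :=
  pvAOuter ranks 0

-- ===== PORT B =====
def obtain_pair_value_py_alt (ranks : List Int) : Option Int :=
  let counts : PySem.Dict Int Int :=
    ranks.foldl (fun d r => d.insert r (d.getD r 0 + 1)) PySem.Dict.empty
  ranks.find? (fun r => 2 ≤ counts.getD r 0)

-- ===== PRECONDITION & SPEC =====
def Spec_obtain_pair_value_py (ranks : List Int) (out : Option Int) : Prop := out = obtain_pair_value_py_alt ranks
instance (ranks : List Int) (out : Option Int) : Decidable (Spec_obtain_pair_value_py ranks out) := by unfold Spec_obtain_pair_value_py; infer_instance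

-- ===== CLAIM (what is proved, stated in full; the proofs are below) =====
def Claim_equal_obtain_pair_value_py : Prop := ∀ (ranks : List Int), Dom_obtain_pair_value_py ranks → Spec_obtain_pair_value_py ranks (obtain_pair_value_py ranks)

-- ===== LEMMAS AND PROOFS =====

-- reference form of A: first element with a duplicate later in the list
def pvFirstDup : List Int → Option Int
  | [] => none
  | x :: xs => if xs.contains x then some x else pvFirstDup xs

theorem pvAInner_eq (ranks : List Int) (i j : Nat) :
    pvAInner ranks i j =
      if (ranks.drop j).contains (ranks.getD i 0) then some (ranks.getD i 0) else none := by
  by_cases h : j < ranks.length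
  · rw [pvAInner, if_pos h, pvAInner_eq ranks i (j+1)]
    have hd : ranks.drop j = ranks[j] :: ranks.drop (j+1) := List.drop_eq_getElem_cons h
    have hg : ranks.getD j 0 = ranks[j] := List.getD_eq_getElem ranks 0 h
    rw [hd, ← hg]
    by_cases he : ranks.getD i 0 = ranks.getD j 0
    · rw [if_pos he, List.contains_cons]
      have hbe : (ranks.getD i 0 == ranks.getD j 0) = true := by simpa using he
      rw [hbe, Bool.true_or]
      simp
    · rw [if_neg he, List.contains_cons]
      have hbe : (ranks.getD i 0 == ranks.getD j 0) = false := by simpa using he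
      rw [hbe, Bool.false_or]
  · rw [pvAInner, if_neg h]
    have hnil : ranks.drop j = [] := List.drop_eq_nil_of_le (Nat.le_of_not_lt h)
    simp [hnil]
termination_by ranks.length - j

theorem pvAOuter_eq (ranks : List Int) (i : Nat) :
    pvAOuter ranks i = pvFirstDup (ranks.drop i) := by
  by_cases h : i + 1 < ranks.length
  · have hi : i < ranks.length := Nat.lt_of_succ_lt h
    rw [pvAOuter, if_pos h, pvAInner_eq, pvAOuter_eq ranks (i+1)]
    have hd : ranks.drop i = ranks[i] :: ranks.drop (i+1) := List.drop_eq_getElem_cons hi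
    have hg : ranks.getD i 0 = ranks[i] := List.getD_eq_getElem ranks 0 hi
    rw [hd, pvFirstDup, hg]
    split_ifs with hc <;> simp [hc]
  · rw [pvAOuter, if_neg h]
    rcases Nat.lt_or_ge i ranks.length with hi | hi
    · have hn : i + 1 = ranks.length := Nat.le_antisymm hi (Nat.le_of_not_lt h)
      have hd : ranks.drop i = ranks[i] :: ranks.drop (i+1) := List.drop_eq_getElem_cons hi
      have h2 : ranks.drop (i+1) = [] := by rw [hn]; simp
      rw [hd, h2, pvFirstDup]
      simp [pvFirstDup]
    · have : ranks.drop i = [] := List.drop_eq_nil_of_le hi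
      simp [this, pvFirstDup]
termination_by ranks.length - i

-- firstDup = find? with a global count ≥ 2, via a generalized invariant over the scanned prefix
theorem pvFirstDup_eq_find (pre l : List Int)
    (hpre : ∀ x ∈ pre, (pre ++ l).count x < 2) :
    pvFirstDup l = l.find? (fun r => 2 ≤ (pre ++ l).count r) := by
  induction l generalizing pre with
  | nil => simp [pvFirstDup]
  | cons x xs ih =>
    by_cases hc : xs.contains x
    · have hx : x ∈ xs := by simpa using hc
      have h2 : 2 ≤ (pre ++ x :: xs).count x := by
        have h1 : 1 ≤ xs.count x := List.one_le_count_iff.mpr hx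
        rw [List.count_append, List.count_cons_self]
        omega
      rw [pvFirstDup, if_pos hc]
      rw [List.find?_cons_of_pos (by simpa using h2)]
    · have hxxs : xs.count x = 0 := by
        rw [List.count_eq_zero]
        intro hm; exact hc (by simpa using hm)
      have hxpre : x ∉ pre := by
        intro hx
        have hlt := hpre x hx
        have h1 : 1 ≤ pre.count x := List.one_le_count_iff.mpr hx
        rw [List.count_append, List.count_cons_self] at hlt
        omega
      have hcount : (pre ++ x :: xs).count x = 1 := by
        have hp : pre.count x = 0 := List.count_eq_zero.mpr hxpre
        rw [List.count_append, List.count_cons_self]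
        omega
      have hassoc : (pre ++ [x]) ++ xs = pre ++ x :: xs := by simp
      have hpre' : ∀ y ∈ pre ++ [x], ((pre ++ [x]) ++ xs).count y < 2 := by
        intro y hy
        rw [hassoc]
        rcases List.mem_append.mp hy with hmem | hmem
        · exact hpre y hmem
        · have hyx : y = x := by simpa using hmem
          rw [hyx, hcount]; omega
      have hrec := ih (pre ++ [x]) hpre'
      rw [hassoc] at hrec
      rw [pvFirstDup, if_neg hc, hrec]
      rw [List.find?_cons_of_neg (by simp only [decide_eq_true_eq]; omega)]

theorem pvCounts_eq (ranks : List Int) (r : Int) :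
    (ranks.foldl (fun d r => d.insert r (d.getD r 0 + 1)) PySem.Dict.empty).getD r 0
      = (ranks.count r : Int) := by
  rw [PySem.Dict.foldl_insert_getD_add_one_eq_counter, PySem.Dict.getD_counter]

-- ===== VERDICT (by name: the statement is the Claim_ definition above) =====
theorem obtain_pair_value_py_spec : Claim_equal_obtain_pair_value_py := by
  intro ranks _
  unfold Spec_obtain_pair_value_py obtain_pair_value_py obtain_pair_value_py_alt
  rw [pvAOuter_eq]
  simp only [List.drop_zero]
  have hfind : pvFirstDup ranks = ranks.find? (fun r => 2 ≤ ranks.count r) := by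
    have := pvFirstDup_eq_find [] ranks (by simp)
    simpa using this
  rw [hfind]
  congr 1
  funext r
  rw [pvCounts_eq]
  simp
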